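-- pv_equiv track=rewrite | github.com/techwiz42/agent_framework | backend/app/services/agents/business_agent.py | _generate_risk_management_strategies
-- ===== SOURCE A (Python) =====
-- from typing import Dict, Any, Optional, List, Union
--
-- def _generate_risk_management_strategies(
--
--     risk_factors: List[str],
--     initiative_type: str,
--     timeframe_months: int
-- ) -> List[Dict[str, str]]:
--     """
--     Generate risk management strategies.
--
--     Args:
--         risk_factors: List of risk factors.
--         initiative_type: Type of initiative.
--         timeframe_months: Timeframe in months.
--
--     Returns:
--         List of risk management strategy dictionaries.
--     """
--     risk_strategies = []
--
--     for risk in risk_factors: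
--         # Analyze risk characteristics
--         risk_lower = risk.lower()
--
--         # Determine risk likelihood
--         if "typically" in risk_lower or "common" in risk_lower or "frequently" in risk_lower:
--             likelihood = "High"
--         elif "possible" in risk_lower or "potential" in risk_lower or "may" in risk_lower:
--             likelihood = "Medium"
--         else:
--             # Determine based on initiative type and timeframe
--             if initiative_type in ["digital_transformation", "m_and_a"] and "integration" in risk_lower:
--                 likelihood = "High"
--             elif initiative_type == "product_launch" and "delay" in risk_lower:
--                 likelihood = "Medium-High"
--             elif timeframe_months > 12 and "change" in risk_lower:
--                 likelihood = "Medium-High"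
--             else:
--                 likelihood = "Medium"
--
--         # Determine risk impact
--         if any(term in risk_lower for term in ["significant", "major", "critical", "substantial"]):
--             impact = "High"
--         elif any(term in risk_lower for term in ["moderate", "important"]):
--             impact = "Medium"
--         else:
--             # Determine based on risk content
--             if "cost" in risk_lower or "budget" in risk_lower:
--                 impact = "Medium-High"
--             elif "delay" in risk_lower or "timeline" in risk_lower:
--                 impact = "Medium"
--             elif "quality" in risk_lower or "performance" in risk_lower:
--                 impact = "High"
--             else:
--                 impact = "Medium"
--
--         # Generate appropriate mitigation strategy
--         if "resource" in risk_lower or "capacity" in risk_lower: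
--             mitigation = "Develop detailed resource plan with contingency options and regular capacity reviews"
--         elif "delay" in risk_lower or "timeline" in risk_lower:
--             mitigation = "Implement robust project management with buffer periods and critical path monitoring"
--         elif "resistance" in risk_lower or "adoption" in risk_lower:
--             mitigation = "Develop comprehensive change management plan with stakeholder engagement and clear communication of benefits"
--         elif "technical" in risk_lower or "integration" in risk_lower:
--             mitigation = "Conduct technical proof of concept early and implement phased approach with quality gates"
--         elif "market" in risk_lower or "customer" in risk_lower:
--             mitigation = "Validate with customer research pre-launch and prepare contingency plans for different market response scenarios"
--         elif "cost" in risk_lower or "budget" in risk_lower: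
--             mitigation = "Implement rigorous cost tracking and establish clear thresholds for escalation and remediation"
--         else:
--             mitigation = "Develop detailed risk response plan with clear ownership and monitoring mechanisms"
--
--         risk_strategies.append({
--             "risk": risk,
--             "likelihood": likelihood,
--             "impact": impact,
--             "mitigation_strategy": mitigation
--         })
--
--     return risk_strategies
-- ===== SOURCE B (Python) =====
-- from typing import List, Dict
--
-- # Every keyword any classification looks for, in one tuple.
-- _ALL_KEYWORDS = ("typically", "common", "frequently", "possible", "potential",
--                  "may", "integration", "delay", "change", "significant", "major",
--                  "critical", "substantial", "moderate", "important", "cost",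
--                  "budget", "timeline", "quality", "performance", "resource",
--                  "capacity", "resistance", "adoption", "technical", "market",
--                  "customer")
--
--
-- # Index the keywords by their first character so the scan only tries the few
-- # keywords that can possibly start at each position.
-- _BY_FIRST = {}
-- for _kw in _ALL_KEYWORDS:
--     _BY_FIRST.setdefault(_kw[0], []).append(_kw)
--
--
-- def _keyword_hits(rl):
--     """One left-to-right scan of rl collecting the set of keywords occurring in it."""
--     found = set()
--     for i in range(len(rl)):
--         for kw in _BY_FIRST.get(rl[i], ()):
--             if kw not in found and rl[i:i + len(kw)] == kw:
--                 found.add(kw)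
--     return found
--
--
-- def _generate_risk_management_strategies(
--     risk_factors: List[str],
--     initiative_type: str,
--     timeframe_months: int
-- ) -> List[Dict[str, str]]:
--     strategies = []
--     for risk in risk_factors:
--         found = _keyword_hits(risk.lower())
--
--         if "typically" in found or "common" in found or "frequently" in found:
--             likelihood = "High"
--         elif "possible" in found or "potential" in found or "may" in found:
--             likelihood = "Medium"
--         elif initiative_type in ("digital_transformation", "m_and_a") and "integration" in found:
--             likelihood = "High"
--         elif initiative_type == "product_launch" and "delay" in found:
--             likelihood = "Medium-High"
--         elif timeframe_months > 12 and "change" in found: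
--             likelihood = "Medium-High"
--         else:
--             likelihood = "Medium"
--
--         if found & {"significant", "major", "critical", "substantial"}:
--             impact = "High"
--         elif found & {"moderate", "important"}:
--             impact = "Medium"
--         elif found & {"cost", "budget"}:
--             impact = "Medium-High"
--         elif found & {"delay", "timeline"}:
--             impact = "Medium"
--         elif found & {"quality", "performance"}:
--             impact = "High"
--         else:
--             impact = "Medium"
--
--         if found & {"resource", "capacity"}:
--             mitigation = "Develop detailed resource plan with contingency options and regular capacity reviews"
--         elif found & {"delay", "timeline"}:
--             mitigation = "Implement robust project management with buffer periods and critical path monitoring"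
--         elif found & {"resistance", "adoption"}:
--             mitigation = "Develop comprehensive change management plan with stakeholder engagement and clear communication of benefits"
--         elif found & {"technical", "integration"}:
--             mitigation = "Conduct technical proof of concept early and implement phased approach with quality gates"
--         elif found & {"market", "customer"}:
--             mitigation = "Validate with customer research pre-launch and prepare contingency plans for different market response scenarios"
--         elif found & {"cost", "budget"}:
--             mitigation = "Implement rigorous cost tracking and establish clear thresholds for escalation and remediation"
--         else:
--             mitigation = "Develop detailed risk response plan with clear ownership and monitoring mechanisms"
--
--         strategies.append({
--             "risk": risk,
--             "likelihood": likelihood,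
--             "impact": impact,
--             "mitigation_strategy": mitigation,
--         })
--     return strategies
-- ===== Notes on version B (the rewrite author's own statement) =====
-- stated objective: alternative
-- what changed: Instead of A's ~25 lazy per-keyword substring searches inside three if/elif cascades, B makes one positional left-to-right scan of each lowercased risk (trying, at each position, only the keywords indexed under that first character) to collect the set of all keywords occurring in it, then classifies likelihood/impact/mitigation by set-membership and set-intersection tests on that precomputed hit set.
import Mathlib
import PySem

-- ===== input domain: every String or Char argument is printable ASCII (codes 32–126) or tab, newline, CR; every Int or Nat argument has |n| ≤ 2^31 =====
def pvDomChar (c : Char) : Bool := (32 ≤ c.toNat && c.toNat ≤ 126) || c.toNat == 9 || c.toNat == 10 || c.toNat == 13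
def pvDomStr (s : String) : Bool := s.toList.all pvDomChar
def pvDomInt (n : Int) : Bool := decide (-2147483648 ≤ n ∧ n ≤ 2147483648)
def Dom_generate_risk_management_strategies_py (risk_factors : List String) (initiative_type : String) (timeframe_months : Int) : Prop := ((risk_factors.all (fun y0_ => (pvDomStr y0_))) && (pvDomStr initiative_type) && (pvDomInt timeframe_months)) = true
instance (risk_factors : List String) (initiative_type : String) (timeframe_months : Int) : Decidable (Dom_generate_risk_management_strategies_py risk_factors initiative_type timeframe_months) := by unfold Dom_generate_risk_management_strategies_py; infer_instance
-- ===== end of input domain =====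

-- B replaces A's ~25 lazy per-keyword substring searches by ONE positional left-to-right scan
-- of the lowercased risk collecting the set of all occurring keywords, then classifies by pure
-- set operations (objective: alternative string-matching strategy).

-- ===== PORT A =====
-- literal transliteration of A's per-risk if/elif cascades; the for-loop with append is a foldl.
def generate_risk_management_strategies_py (risk_factors : List String) (initiative_type : String) (timeframe_months : Int) : List (List (String × String)) :=
  risk_factors.foldl (fun risk_strategies risk =>
    let risk_lower := PySem.Str.lower risk
    let likelihood :=
      if PySem.Str.isIn "typically" risk_lower || PySem.Str.isIn "common" risk_lower || PySem.Str.isIn "frequently" risk_lower then "High"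
      else if PySem.Str.isIn "possible" risk_lower || PySem.Str.isIn "potential" risk_lower || PySem.Str.isIn "may" risk_lower then "Medium"
      else
        if ["digital_transformation", "m_and_a"].contains initiative_type && PySem.Str.isIn "integration" risk_lower then "High"
        else if initiative_type == "product_launch" && PySem.Str.isIn "delay" risk_lower then "Medium-High"
        else if timeframe_months > 12 && PySem.Str.isIn "change" risk_lower then "Medium-High"
        else "Medium"
    let impact :=
      if ["significant", "major", "critical", "substantial"].any (fun term => PySem.Str.isIn term risk_lower) then "High"
      else if ["moderate", "important"].any (fun term => PySem.Str.isIn term risk_lower) then "Medium"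
      else
        if PySem.Str.isIn "cost" risk_lower || PySem.Str.isIn "budget" risk_lower then "Medium-High"
        else if PySem.Str.isIn "delay" risk_lower || PySem.Str.isIn "timeline" risk_lower then "Medium"
        else if PySem.Str.isIn "quality" risk_lower || PySem.Str.isIn "performance" risk_lower then "High"
        else "Medium"
    let mitigation :=
      if PySem.Str.isIn "resource" risk_lower || PySem.Str.isIn "capacity" risk_lower then "Develop detailed resource plan with contingency options and regular capacity reviews"
      else if PySem.Str.isIn "delay" risk_lower || PySem.Str.isIn "timeline" risk_lower then "Implement robust project management with buffer periods and critical path monitoring"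
      else if PySem.Str.isIn "resistance" risk_lower || PySem.Str.isIn "adoption" risk_lower then "Develop comprehensive change management plan with stakeholder engagement and clear communication of benefits"
      else if PySem.Str.isIn "technical" risk_lower || PySem.Str.isIn "integration" risk_lower then "Conduct technical proof of concept early and implement phased approach with quality gates"
      else if PySem.Str.isIn "market" risk_lower || PySem.Str.isIn "customer" risk_lower then "Validate with customer research pre-launch and prepare contingency plans for different market response scenarios"
      else if PySem.Str.isIn "cost" risk_lower || PySem.Str.isIn "budget" risk_lower then "Implement rigorous cost tracking and establish clear thresholds for escalation and remediation"
      else "Develop detailed risk response plan with clear ownership and monitoring mechanisms"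
    risk_strategies ++ [[("risk", risk), ("likelihood", likelihood), ("impact", impact), ("mitigation_strategy", mitigation)]]) []

-- ===== PORT B =====
-- _ALL_KEYWORDS of Source B
def pvAllKeywords : List String :=
  ["typically", "common", "frequently", "possible", "potential",
   "may", "integration", "delay", "change", "significant", "major",
   "critical", "substantial", "moderate", "important", "cost",
   "budget", "timeline", "quality", "performance", "resource",
   "capacity", "resistance", "adoption", "technical", "market",
   "customer"]

-- _BY_FIRST of Source B: keywords indexed by their first character (built by the same loop)
def pvByFirst : PySem.Dict Char (List String) :=
  pvAllKeywords.foldl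
    (fun d kw =>
      PySem.Dict.insert d (PySem.List.pyGetD kw.toList 0 ' ')
        ((PySem.Dict.getD d (PySem.List.pyGetD kw.toList 0 ' ') []) ++ [kw]))
    PySem.Dict.empty

-- _keyword_hits of Source B: one positional scan of rl collecting the set of occurring keywords;
-- at position i only the keywords starting with rl[i] are tried.
-- rl[i] and kw[0] are always in range (i < len rl, keywords nonempty), so pyGetD's default is never used.
def pvKeywordHits (rl : String) : PySem.Set String :=
  (PySem.List.pyRange 0 (rl.toList.length : Int) 1).foldl
    (fun found i =>
      (PySem.Dict.getD pvByFirst (PySem.List.pyGetD rl.toList i ' ') []).foldl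
        (fun found kw =>
          if !(PySem.Set.contains found kw) && (PySem.Str.slice rl (some i) (some (i + (kw.toList.length : Int))) == kw)
          then PySem.Set.add found kw else found)
        found)
    PySem.Set.empty

def generate_risk_management_strategies_py_alt (risk_factors : List String) (initiative_type : String) (timeframe_months : Int) : List (List (String × String)) :=
  risk_factors.map (fun risk =>
    let found := pvKeywordHits (PySem.Str.lower risk)
    let likelihood :=
      if PySem.Set.contains found "typically" || PySem.Set.contains found "common" || PySem.Set.contains found "frequently" then "High"
      else if PySem.Set.contains found "possible" || PySem.Set.contains found "potential" || PySem.Set.contains found "may" then "Medium"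
      else if ["digital_transformation", "m_and_a"].contains initiative_type && PySem.Set.contains found "integration" then "High"
      else if initiative_type == "product_launch" && PySem.Set.contains found "delay" then "Medium-High"
      else if timeframe_months > 12 && PySem.Set.contains found "change" then "Medium-High"
      else "Medium"
    let impact :=
      if PySem.Set.inter found ["significant", "major", "critical", "substantial"] ≠ [] then "High"
      else if PySem.Set.inter found ["moderate", "important"] ≠ [] then "Medium"
      else if PySem.Set.inter found ["cost", "budget"] ≠ [] then "Medium-High"
      else if PySem.Set.inter found ["delay", "timeline"] ≠ [] then "Medium"
      else if PySem.Set.inter found ["quality", "performance"] ≠ [] then "High"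
      else "Medium"
    let mitigation :=
      if PySem.Set.inter found ["resource", "capacity"] ≠ [] then "Develop detailed resource plan with contingency options and regular capacity reviews"
      else if PySem.Set.inter found ["delay", "timeline"] ≠ [] then "Implement robust project management with buffer periods and critical path monitoring"
      else if PySem.Set.inter found ["resistance", "adoption"] ≠ [] then "Develop comprehensive change management plan with stakeholder engagement and clear communication of benefits"
      else if PySem.Set.inter found ["technical", "integration"] ≠ [] then "Conduct technical proof of concept early and implement phased approach with quality gates"
      else if PySem.Set.inter found ["market", "customer"] ≠ [] then "Validate with customer research pre-launch and prepare contingency plans for different market response scenarios"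
      else if PySem.Set.inter found ["cost", "budget"] ≠ [] then "Implement rigorous cost tracking and establish clear thresholds for escalation and remediation"
      else "Develop detailed risk response plan with clear ownership and monitoring mechanisms"
    [("risk", risk), ("likelihood", likelihood), ("impact", impact), ("mitigation_strategy", mitigation)])

-- ===== PRECONDITION & SPEC =====
def Spec_generate_risk_management_strategies_py (risk_factors : List String) (initiative_type : String) (timeframe_months : Int) (out : List (List (String × String))) : Prop := out = generate_risk_management_strategies_py_alt risk_factors initiative_type timeframe_months
instance (risk_factors : List String) (initiative_type : String) (timeframe_months : Int) (out : List (List (String × String))) : Decidable (Spec_generate_risk_management_strategies_py risk_factors initiative_type timeframe_months out) := by unfold Spec_generate_risk_management_strategies_py; infer_instance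

-- ===== CLAIM (what is proved, stated in full; the proofs are below) =====
def Claim_equal_generate_risk_management_strategies_py : Prop := ∀ (risk_factors : List String) (initiative_type : String) (timeframe_months : Int), Dom_generate_risk_management_strategies_py risk_factors initiative_type timeframe_months → Spec_generate_risk_management_strategies_py risk_factors initiative_type timeframe_months (generate_risk_management_strategies_py risk_factors initiative_type timeframe_months)

-- ===== LEMMAS AND PROOFS =====

-- membership through the inner keyword fold
theorem pv_mem_inner (kws : List String) (p : String → Bool) (f : PySem.Set String) (x : String) :
    x ∈ kws.foldl (fun f kw => if !(PySem.Set.contains f kw) && p kw then PySem.Set.add f kw else f) f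
      ↔ x ∈ f ∨ (x ∈ kws ∧ p x = true) := by
  induction kws generalizing f with
  | nil => simp
  | cons kw kws ih =>
    simp only [List.foldl_cons, ih, List.mem_cons]
    by_cases hcond : (!(PySem.Set.contains f kw) && p kw) = true
    · rw [if_pos hcond]
      obtain ⟨hc, hp⟩ := Bool.and_eq_true_iff.mp hcond
      rw [Bool.not_eq_true'] at hc
      constructor
      · rintro (hm | h)
        · rcases (PySem.Set.mem_add f kw x).mp hm with h | rfl
          · tauto
          · exact Or.inr ⟨Or.inl rfl, hp⟩
        · tauto
      · rintro (h | ⟨(rfl | h), hpx⟩)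
        · exact Or.inl ((PySem.Set.mem_add _ _ _).mpr (Or.inl h))
        · exact Or.inl ((PySem.Set.mem_add _ _ _).mpr (Or.inr rfl))
        · tauto
    · rw [if_neg hcond]
      rw [Bool.and_eq_true_iff, not_and_or] at hcond
      simp only [Bool.not_eq_true] at hcond
      constructor
      · rintro (h | h) <;> tauto
      · rintro (h | ⟨(rfl | h), hpx⟩)
        · tauto
        · rcases hcond with hc | hp
          · exact Or.inl ((PySem.Set.contains_iff f x).mp (by simpa using hc))
          · exact absurd hpx (by simp [hp])
        · tauto

-- membership through the outer position fold
theorem pv_mem_outer (is : List Int) (ks : Int → List String) (p : Int → String → Bool) (f : PySem.Set String) (x : String) :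
    x ∈ is.foldl (fun f i =>
        (ks i).foldl (fun f kw => if !(PySem.Set.contains f kw) && p i kw then PySem.Set.add f kw else f) f) f
      ↔ x ∈ f ∨ ∃ i ∈ is, x ∈ ks i ∧ p i x = true := by
  induction is generalizing f with
  | nil => simp
  | cons i is ih =>
    simp only [List.foldl_cons, ih, pv_mem_inner, List.mem_cons]
    constructor
    · rintro ((h | ⟨hm, hp⟩) | ⟨j, hj, hm, hp⟩)
      · tauto
      · exact Or.inr ⟨i, Or.inl rfl, hm, hp⟩
      · exact Or.inr ⟨j, Or.inr hj, hm, hp⟩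
    · rintro (h | ⟨j, (rfl | hj), hm, hp⟩)
      · tauto
      · exact Or.inl (Or.inr ⟨hm, hp⟩)
      · exact Or.inr ⟨j, hj, hm, hp⟩

-- every keyword is filed in pvByFirst under its own first character
theorem pv_mem_byFirst (kw : String) (hmem : kw ∈ pvAllKeywords) :
    kw ∈ PySem.Dict.getD pvByFirst (PySem.List.pyGetD kw.toList 0 ' ') [] := by
  fin_cases hmem <;> decide

-- the scan finds exactly the keywords that occur as substrings
theorem pv_mem_hits (rl kw : String) (hmem : kw ∈ pvAllKeywords) (hne : kw.toList ≠ []) :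
    kw ∈ pvKeywordHits rl ↔ PySem.Str.isIn kw rl = true := by
  unfold pvKeywordHits
  rw [pv_mem_outer]
  simp only [PySem.Set.empty, List.not_mem_nil, false_or]
  constructor
  · rintro ⟨i, hi, -, hp⟩
    rw [PySem.List.mem_pyRange_one] at hi
    obtain ⟨h0, hlt⟩ := hi
    obtain ⟨j, rfl⟩ := Int.eq_ofNat_of_zero_le h0
    rw [PySem.Str.isIn_eq, ← PySem.Chars.exists_prefix_drop_iff_isIn]
    refine ⟨j, ?_⟩
    have : (PySem.Str.slice rl (some (j : Int)) (some ((j : Int) + (kw.toList.length : Int)))).toList = kw.toList := by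
      have := beq_iff_eq.mp hp
      rw [this]
    rw [PySem.Str.toList_slice, PySem.Chars.slice_eq_listSlice, PySem.List.slice_natCast_add] at this
    rw [List.prefix_iff_eq_take]
    exact this.symm
  · intro hin
    rw [PySem.Str.isIn_eq, ← PySem.Chars.exists_prefix_drop_iff_isIn] at hin
    obtain ⟨j, hpre⟩ := hin
    have hdropne : rl.toList.drop j ≠ [] := by
      intro h
      rw [h] at hpre
      exact hne (List.prefix_nil.mp hpre)
    have hj : j < rl.toList.length := by
      by_contra h
      exact hdropne (List.drop_eq_nil_of_le (by omega))
    obtain ⟨t, ht⟩ := hpre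
    have hkwlen : 0 < kw.toList.length := List.length_pos_of_ne_nil hne
    have hchar : PySem.List.pyGetD rl.toList ((j : Nat) : Int) ' ' = PySem.List.pyGetD kw.toList 0 ' ' := by
      rw [PySem.List.pyGetD_natCast, PySem.List.pyGetD_of_nonneg _ _ le_rfl]
      rw [List.getD_eq_getElem _ _ (by omega), List.getD_eq_getElem _ _ (by simpa using hkwlen)]
      have h1 : rl.toList[j]'hj = (rl.toList.drop j)[0]'(by rw [List.length_drop]; omega) := by
        rw [List.getElem_drop]
        try simp
      have h2 : (rl.toList.drop j)[0]'(by rw [List.length_drop]; omega)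
          = (kw.toList ++ t)[0]'(by rw [ht, List.length_drop]; omega) := by
        simp only [← ht]
      rw [h1, h2, List.getElem_append_left hkwlen]
      congr 1
    refine ⟨(j : Int), ?_, ?_, ?_⟩
    · rw [PySem.List.mem_pyRange_one]
      exact ⟨Int.natCast_nonneg j, by exact_mod_cast hj⟩
    · rw [hchar]
      exact pv_mem_byFirst kw hmem
    · rw [beq_iff_eq]
      apply String.ext  -- equality of toLists
      rw [PySem.Str.toList_slice, PySem.Chars.slice_eq_listSlice, PySem.List.slice_natCast_add]
      rw [← ht, List.take_left]

-- Bool form for single keywords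
theorem pv_contains_hits (rl kw : String) (hmem : kw ∈ pvAllKeywords) (hne : kw.toList ≠ []) :
    PySem.Set.contains (pvKeywordHits rl) kw = PySem.Str.isIn kw rl := by
  by_cases h : PySem.Str.isIn kw rl = true
  · rw [h, PySem.Set.contains_iff]
    exact (pv_mem_hits rl kw hmem hne).mpr h
  · rw [eq_false_of_ne_true h, Bool.eq_false_iff]
    intro hc
    exact h ((pv_mem_hits rl kw hmem hne).mp ((PySem.Set.contains_iff _ _).mp hc))

-- nonemptiness of an intersection with the hit set
theorem pv_inter_hits (rl : String) (ts : List String)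
    (h : ∀ t ∈ ts, t ∈ pvAllKeywords ∧ t.toList ≠ []) :
    (PySem.Set.inter (pvKeywordHits rl) ts ≠ []) ↔ (ts.any (fun t => PySem.Str.isIn t rl)) = true := by
  have hmem : ∀ x, x ∈ PySem.Set.inter (pvKeywordHits rl) ts ↔ x ∈ pvKeywordHits rl ∧ x ∈ ts :=
    fun x => PySem.Set.mem_inter _ _ x
  rw [← List.isEmpty_eq_false_iff, ← Bool.not_eq_true, List.isEmpty_iff]
  constructor
  · intro hne
    obtain ⟨x, hx⟩ := List.exists_mem_of_ne_nil _ hne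
    obtain ⟨hx1, hx2⟩ := (hmem x).mp hx
    rw [List.any_eq_true]
    exact ⟨x, hx2, (pv_mem_hits rl x (h x hx2).1 (h x hx2).2).mp hx1⟩
  · intro ha hnil
    rw [List.any_eq_true] at ha
    obtain ⟨x, hx, hin⟩ := ha
    have : x ∈ PySem.Set.inter (pvKeywordHits rl) ts :=
      (hmem x).mpr ⟨(pv_mem_hits rl x (h x hx).1 (h x hx).2).mpr hin, hx⟩
    rw [hnil] at this
    exact List.not_mem_nil this

-- per-risk equality of the four fields
theorem pv_elem_eq (risk initiative_type : String) (timeframe_months : Int) :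
    (let risk_lower := PySem.Str.lower risk
    let likelihood :=
      if PySem.Str.isIn "typically" risk_lower || PySem.Str.isIn "common" risk_lower || PySem.Str.isIn "frequently" risk_lower then "High"
      else if PySem.Str.isIn "possible" risk_lower || PySem.Str.isIn "potential" risk_lower || PySem.Str.isIn "may" risk_lower then "Medium"
      else
        if ["digital_transformation", "m_and_a"].contains initiative_type && PySem.Str.isIn "integration" risk_lower then "High"
        else if initiative_type == "product_launch" && PySem.Str.isIn "delay" risk_lower then "Medium-High"
        else if timeframe_months > 12 && PySem.Str.isIn "change" risk_lower then "Medium-High"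
        else "Medium"
    let impact :=
      if ["significant", "major", "critical", "substantial"].any (fun term => PySem.Str.isIn term risk_lower) then "High"
      else if ["moderate", "important"].any (fun term => PySem.Str.isIn term risk_lower) then "Medium"
      else
        if PySem.Str.isIn "cost" risk_lower || PySem.Str.isIn "budget" risk_lower then "Medium-High"
        else if PySem.Str.isIn "delay" risk_lower || PySem.Str.isIn "timeline" risk_lower then "Medium"
        else if PySem.Str.isIn "quality" risk_lower || PySem.Str.isIn "performance" risk_lower then "High"
        else "Medium"
    let mitigation :=
      if PySem.Str.isIn "resource" risk_lower || PySem.Str.isIn "capacity" risk_lower then "Develop detailed resource plan with contingency options and regular capacity reviews"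
      else if PySem.Str.isIn "delay" risk_lower || PySem.Str.isIn "timeline" risk_lower then "Implement robust project management with buffer periods and critical path monitoring"
      else if PySem.Str.isIn "resistance" risk_lower || PySem.Str.isIn "adoption" risk_lower then "Develop comprehensive change management plan with stakeholder engagement and clear communication of benefits"
      else if PySem.Str.isIn "technical" risk_lower || PySem.Str.isIn "integration" risk_lower then "Conduct technical proof of concept early and implement phased approach with quality gates"
      else if PySem.Str.isIn "market" risk_lower || PySem.Str.isIn "customer" risk_lower then "Validate with customer research pre-launch and prepare contingency plans for different market response scenarios"
      else if PySem.Str.isIn "cost" risk_lower || PySem.Str.isIn "budget" risk_lower then "Implement rigorous cost tracking and establish clear thresholds for escalation and remediation"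
      else "Develop detailed risk response plan with clear ownership and monitoring mechanisms"
    [("risk", risk), ("likelihood", likelihood), ("impact", impact), ("mitigation_strategy", mitigation)] : List (String × String)) =
    (let found := pvKeywordHits (PySem.Str.lower risk)
    let likelihood :=
      if PySem.Set.contains found "typically" || PySem.Set.contains found "common" || PySem.Set.contains found "frequently" then "High"
      else if PySem.Set.contains found "possible" || PySem.Set.contains found "potential" || PySem.Set.contains found "may" then "Medium"
      else if ["digital_transformation", "m_and_a"].contains initiative_type && PySem.Set.contains found "integration" then "High"
      else if initiative_type == "product_launch" && PySem.Set.contains found "delay" then "Medium-High"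
      else if timeframe_months > 12 && PySem.Set.contains found "change" then "Medium-High"
      else "Medium"
    let impact :=
      if PySem.Set.inter found ["significant", "major", "critical", "substantial"] ≠ [] then "High"
      else if PySem.Set.inter found ["moderate", "important"] ≠ [] then "Medium"
      else if PySem.Set.inter found ["cost", "budget"] ≠ [] then "Medium-High"
      else if PySem.Set.inter found ["delay", "timeline"] ≠ [] then "Medium"
      else if PySem.Set.inter found ["quality", "performance"] ≠ [] then "High"
      else "Medium"
    let mitigation :=
      if PySem.Set.inter found ["resource", "capacity"] ≠ [] then "Develop detailed resource plan with contingency options and regular capacity reviews"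
      else if PySem.Set.inter found ["delay", "timeline"] ≠ [] then "Implement robust project management with buffer periods and critical path monitoring"
      else if PySem.Set.inter found ["resistance", "adoption"] ≠ [] then "Develop comprehensive change management plan with stakeholder engagement and clear communication of benefits"
      else if PySem.Set.inter found ["technical", "integration"] ≠ [] then "Conduct technical proof of concept early and implement phased approach with quality gates"
      else if PySem.Set.inter found ["market", "customer"] ≠ [] then "Validate with customer research pre-launch and prepare contingency plans for different market response scenarios"
      else if PySem.Set.inter found ["cost", "budget"] ≠ [] then "Implement rigorous cost tracking and establish clear thresholds for escalation and remediation"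
      else "Develop detailed risk response plan with clear ownership and monitoring mechanisms"
    [("risk", risk), ("likelihood", likelihood), ("impact", impact), ("mitigation_strategy", mitigation)]) := by
  have hc : ∀ kw, kw ∈ pvAllKeywords → kw.toList ≠ [] →
      PySem.Set.contains (pvKeywordHits (PySem.Str.lower risk)) kw = PySem.Str.isIn kw (PySem.Str.lower risk) :=
    fun kw h1 h2 => pv_contains_hits _ kw h1 h2
  have hi : ∀ ts : List String, (∀ t ∈ ts, t ∈ pvAllKeywords ∧ t.toList ≠ []) →
      ((PySem.Set.inter (pvKeywordHits (PySem.Str.lower risk)) ts ≠ []) ↔ (ts.any (fun t => PySem.Str.isIn t (PySem.Str.lower risk))) = true) :=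
    fun ts h => pv_inter_hits _ ts h
  simp only [hc "typically" (by decide) (by decide), hc "common" (by decide) (by decide), hc "frequently" (by decide) (by decide), hc "possible" (by decide) (by decide), hc "potential" (by decide) (by decide), hc "may" (by decide) (by decide), hc "integration" (by decide) (by decide), hc "delay" (by decide) (by decide), hc "change" (by decide) (by decide)]
  simp only [hi ["significant", "major", "critical", "substantial"] (by decide), hi ["moderate", "important"] (by decide), hi ["cost", "budget"] (by decide), hi ["delay", "timeline"] (by decide), hi ["quality", "performance"] (by decide), hi ["resource", "capacity"] (by decide), hi ["resistance", "adoption"] (by decide), hi ["technical", "integration"] (by decide), hi ["market", "customer"] (by decide)]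
  simp only [List.any_cons, List.any_nil, Bool.or_false, Bool.or_assoc]

theorem pv_foldl_eq (risk_factors : List String) (initiative_type : String) (timeframe_months : Int) :
    generate_risk_management_strategies_py risk_factors initiative_type timeframe_months =
    generate_risk_management_strategies_py_alt risk_factors initiative_type timeframe_months := by
  unfold generate_risk_management_strategies_py generate_risk_management_strategies_py_alt
  rw [PySem.List.foldl_append_singleton_eq_map]
  simp only [List.nil_append]
  refine List.map_congr_left (fun risk _ => ?_)
  exact pv_elem_eq risk initiative_type timeframe_months

-- ===== VERDICT (by name: the statement is the Claim_ definition above) =====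
theorem generate_risk_management_strategies_py_spec : Claim_equal_generate_risk_management_strategies_py := by
  intro rf ity tm _
  exact pv_foldl_eq rf ity tm
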